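-- pv_equiv track=rewrite | github.com/daosearchorg/daosearch | scraper/services/google_translate.py | _sentence_case
-- ===== SOURCE A (Python) =====
-- def _sentence_case(text: str) -> str:
--     """Ensure proper sentence capitalization: first letter and after periods."""
--     if not text:
--         return text
--     # Capitalize first character
--     text = text[0].upper() + text[1:] if len(text) > 1 else text.upper()
--     # Capitalize after sentence-ending punctuation followed by space
--     result = []
--     capitalize_next = False
--     for ch in text:
--         if capitalize_next and ch.isalpha():
--             result.append(ch.upper())
--             capitalize_next = False
--         else:
--             result.append(ch)
--         if ch in '.!?' and not capitalize_next:
--             capitalize_next = True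
--         elif ch == ' ':
--             pass  # keep capitalize_next state
--         elif ch.isalpha():
--             capitalize_next = False
--     return ''.join(result)
-- ===== SOURCE B (Python) =====
-- def _sentence_case(text: str) -> str:
--     """Scan-ahead rewrite: uppercase index 0, then for each '.!?' uppercase the next alphabetic character."""
--     if not text:
--         return text
--     chars = list(text)
--     chars[0] = chars[0].upper()
--     n = len(text)
--     for i, ch in enumerate(text):
--         if ch in '.!?':
--             j = i + 1
--             while j < n and not text[j].isalpha():
--                 j += 1
--             if j < n:
--                 chars[j] = text[j].upper()
--     return ''.join(chars)
-- ===== Notes on version B (the rewrite author's own statement) =====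
-- stated objective: alternative
-- what changed: A threads a carried capitalize_next flag through one pass over the (first-char-uppercased) string; B instead copies the text into a char list, uppercases index 0, and for every sentence-ending punctuation mark scans forward with an inner loop to the next alphabetic character and uppercases it in place.
import Mathlib
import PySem

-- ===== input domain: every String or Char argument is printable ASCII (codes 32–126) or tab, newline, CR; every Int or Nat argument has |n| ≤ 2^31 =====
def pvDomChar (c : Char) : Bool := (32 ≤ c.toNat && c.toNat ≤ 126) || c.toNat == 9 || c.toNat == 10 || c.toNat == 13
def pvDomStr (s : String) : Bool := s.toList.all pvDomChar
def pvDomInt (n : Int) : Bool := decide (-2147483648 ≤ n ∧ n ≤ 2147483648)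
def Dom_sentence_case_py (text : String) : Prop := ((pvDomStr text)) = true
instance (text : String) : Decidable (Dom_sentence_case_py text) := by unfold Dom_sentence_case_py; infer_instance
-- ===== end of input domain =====

-- B replaces A's one-pass carried 'capitalize_next' flag by direct index edits: uppercase position 0,
-- then for every '.!?' scan forward to the next alphabetic character and uppercase it in place (objective: alternative).

-- ===== PORT A =====
-- ch in '.!?'  (single-character membership in the punctuation string)
def pyPunct (c : Char) : Bool := c == '.' || c == '!' || c == '?'

-- the body of A's for-loop, acting on the state (result, capitalize_next)
def stepA (st : List Char × Bool) (ch : Char) : List Char × Bool :=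
  let result := st.1
  let cap := st.2
  let result' := if cap && PySem.Chars.isalpha ch then result ++ [PySem.Chars.upperChar ch]
                 else result ++ [ch]
  let cap' := if pyPunct ch && !cap then true
              else if ch == ' ' then cap
              else if PySem.Chars.isalpha ch then false
              else cap
  (result', cap')

def sentence_case_py (text : String) : String :=
  if text = "" then text
  else
    let cs := text.toList
    -- text = text[0].upper() + text[1:] if len(text) > 1 else text.upper()
    let t : List Char :=
      if cs.length > 1 then PySem.Chars.upper [cs.headI] ++ PySem.List.slice cs (some 1) none
      else PySem.Chars.upper cs
    String.mk (t.foldl stepA ([], false)).1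

-- ===== PORT B =====
-- the inner while-loop: first index j' ≥ j with text[j'].isalpha(), or len(text) if none
def altFind (cs : List Char) (j : Nat) : Nat :=
  if h : j < cs.length then
    if PySem.Chars.isalpha cs[j] then j else altFind cs (j + 1)
  else j
termination_by cs.length - j

-- the body of B's for-loop over enumerate(text): edit the chars list in place
def stepB (cs : List Char) (chars : List Char) (p : Char × Nat) : List Char :=
  if pyPunct p.1 then
    if altFind cs (p.2 + 1) < cs.length then
      chars.set (altFind cs (p.2 + 1)) (PySem.Chars.upperChar (cs.getD (altFind cs (p.2 + 1)) ' '))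
    else chars
  else chars

def sentence_case_py_alt (text : String) : String :=
  if text = "" then text
  else
    let cs := text.toList
    -- chars = list(text); chars[0] = chars[0].upper()
    let chars0 := cs.set 0 (PySem.Chars.upperChar (cs.getD 0 ' '))
    -- for i, ch in enumerate(text): … (zipIdx carries the same 0-based indices as enumerate)
    String.mk (cs.zipIdx.foldl (stepB cs) chars0)

-- ===== PRECONDITION & SPEC =====
def Spec_sentence_case_py (text : String) (out : String) : Prop := out = sentence_case_py_alt text
instance (text : String) (out : String) : Decidable (Spec_sentence_case_py text out) := by unfold Spec_sentence_case_py; infer_instance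

-- ===== CLAIM (what is proved, stated in full; the proofs are below) =====
def Claim_equal_sentence_case_py : Prop := ∀ (text : String), Dom_sentence_case_py text → Spec_sentence_case_py text (sentence_case_py text)

-- ===== LEMMAS AND PROOFS =====

theorem charLe (a b : Char) : (a ≤ b) ↔ a.toNat ≤ b.toNat := by
  rw [Char.le_def, UInt32.le_iff_toNat_le]; rfl

theorem charEq (a b : Char) : (a = b) ↔ a.toNat = b.toNat := by
  constructor
  · rintro rfl; rfl
  · intro h; exact Char.ext (UInt32.toNat.inj h)

theorem up_toNat (c : Char) (h : PySem.Chars.islower c = true) :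
    (PySem.Chars.upperChar c).toNat = c.toNat - 32 ∧ 97 ≤ c.toNat ∧ c.toNat ≤ 122 := by
  unfold PySem.Chars.islower at h
  simp only [Bool.and_eq_true, decide_eq_true_eq, charLe] at h
  have h1 : (97:Nat) ≤ c.toNat := h.1
  have h2 : c.toNat ≤ 122 := h.2
  refine ⟨?_, h1, h2⟩
  unfold PySem.Chars.upperChar
  rw [if_pos, Char.toNat_ofNat, if_pos (by left; change c.toNat - 32 < 55296; omega)]
  unfold PySem.Chars.islower
  simp only [Bool.and_eq_true, decide_eq_true_eq, charLe]
  exact ⟨h1, h2⟩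

theorem al_up (c : Char) : PySem.Chars.isalpha (PySem.Chars.upperChar c) = PySem.Chars.isalpha c := by
  by_cases h : PySem.Chars.islower c = true
  · obtain ⟨ht, h1, h2⟩ := up_toNat c h
    unfold PySem.Chars.isalpha PySem.Chars.isupper PySem.Chars.islower
    simp only [charLe, ht]
    have e : ('A'.toNat = 65) ∧ 'Z'.toNat = 90 ∧ 'a'.toNat = 97 ∧ 'z'.toNat = 122 := by decide
    simp only [e.1, e.2.1, e.2.2.1, e.2.2.2]
    rw [Bool.eq_iff_iff]
    simp only [Bool.or_eq_true, Bool.and_eq_true, decide_eq_true_eq]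
    omega
  · unfold PySem.Chars.upperChar; rw [if_neg h]

theorem punct_up (c : Char) : pyPunct (PySem.Chars.upperChar c) = pyPunct c := by
  by_cases h : PySem.Chars.islower c = true
  · obtain ⟨ht, h1, h2⟩ := up_toNat c h
    unfold pyPunct
    rw [Bool.eq_iff_iff]
    simp only [Bool.or_eq_true, beq_iff_eq, charEq, ht]
    have e : ('.'.toNat = 46) ∧ '!'.toNat = 33 ∧ '?'.toNat = 63 := by decide
    simp only [e.1, e.2.1, e.2.2]
    omega
  · unfold PySem.Chars.upperChar; rw [if_neg h]

theorem punct_not_alpha (c : Char) (h : pyPunct c = true) : PySem.Chars.isalpha c = false := by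
  unfold pyPunct at h
  simp only [Bool.or_eq_true, beq_iff_eq] at h
  rcases h with (rfl | rfl) | rfl <;> decide

-- A's flag update, simplified: alphabetic clears it, punctuation sets it, everything else keeps it
def nextCap (c : Char) (cap : Bool) : Bool :=
  if PySem.Chars.isalpha c then false else if pyPunct c then true else cap

theorem stepA_cap (st : List Char × Bool) (ch : Char) :
    (stepA st ch).2 = nextCap ch st.2 := by
  unfold stepA nextCap
  have k1 := punct_not_alpha ch
  have k2 : (ch == ' ') = true → PySem.Chars.isalpha ch = false := by
    intro h; simp only [beq_iff_eq] at h; subst h; decide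
  have k3 : (ch == ' ') = true → pyPunct ch = false := by
    intro h; simp only [beq_iff_eq] at h; subst h; decide
  by_cases hp : pyPunct ch = true <;> by_cases ha : PySem.Chars.isalpha ch = true <;>
    by_cases hs : (ch == ' ') = true <;> cases h2 : st.2 <;> simp_all

-- proof-side recursive form of A's loop (result part)
def gA : List Char → Bool → List Char
  | [], _ => []
  | c :: cs, cap =>
      (if cap && PySem.Chars.isalpha c then PySem.Chars.upperChar c else c) :: gA cs (nextCap c cap)

theorem foldA_eq (t : List Char) : ∀ (acc : List Char) (cap : Bool),
    (t.foldl stepA (acc, cap)).1 = acc ++ gA t cap := by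
  induction t with
  | nil => intro acc cap; simp [gA]
  | cons c cs ih =>
    intro acc cap
    have hc : stepA (acc, cap) c =
        (acc ++ [if cap && PySem.Chars.isalpha c then PySem.Chars.upperChar c else c], nextCap c cap) := by
      have := stepA_cap (acc, cap) c
      unfold stepA at this ⊢
      cases hb : (cap && PySem.Chars.isalpha c) <;> simp_all
    simp only [List.foldl_cons, hc, ih, gA]
    simp

theorem gA_length (t : List Char) (cap : Bool) : (gA t cap).length = t.length := by
  induction t generalizing cap with
  | nil => rfl
  | cons c cs ih => simp [gA, ih]

-- the flag after consuming a prefix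
def capF (v : List Char) (cap : Bool) : Bool := v.foldl (fun b c => nextCap c b) cap

theorem gA_getD (t : List Char) : ∀ (cap : Bool) (k : Nat), k < t.length →
    (gA t cap).getD k ' ' =
      (if capF (t.take k) cap && PySem.Chars.isalpha (t.getD k ' ') then
        PySem.Chars.upperChar (t.getD k ' ') else t.getD k ' ') := by
  induction t with
  | nil => intro _ k hk; simp at hk
  | cons c cs ih =>
    intro cap k hk
    cases k with
    | zero => simp [gA, capF]
    | succ k =>
      have hk' : k < cs.length := by simpa using hk
      simp only [gA, List.getD_cons_succ, List.take_succ_cons]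
      rw [ih (nextCap c cap) k hk']
      have : capF (c :: cs.take k) cap = capF (cs.take k) (nextCap c cap) := by simp [capF]
      rw [this]

-- the flag (started false) is set exactly when the last alphabetic-or-punctuation character seen is punctuation
theorem capF_iff (v : List Char) : capF v false = true ↔
    ∃ i, i < v.length ∧ pyPunct (v.getD i ' ') = true ∧
      ∀ m, i < m → m < v.length → PySem.Chars.isalpha (v.getD m ' ') = false := by
  induction v using List.reverseRecOn with
  | nil => simp [capF]
  | append_singleton w c ih =>
    have hstep : capF (w ++ [c]) false = nextCap c (capF w false) := by simp [capF]
    have hlt : ∀ n, n < w.length → (w ++ [c]).getD n ' ' = w.getD n ' ' := by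
      intro n h
      simp [List.getD_eq_getElem?_getD, List.getElem?_append_left h]
    have hat : (w ++ [c]).getD w.length ' ' = c := by
      rw [List.getD_eq_getElem?_getD, List.getElem?_append_right (le_refl w.length)]
      simp
    have hlen : (w ++ [c]).length = w.length + 1 := by simp
    rw [hstep]
    unfold nextCap
    by_cases hac : PySem.Chars.isalpha c = true
    · rw [if_pos hac]
      simp only [Bool.false_eq_true, false_iff, not_exists]
      rintro i ⟨hi, hp, hall⟩
      rw [hlen] at hi
      rcases Nat.lt_succ_iff_lt_or_eq.mp hi with hi' | rfl
      · have := hall w.length hi' (by omega)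
        rw [hat] at this; rw [this] at hac; exact Bool.false_ne_true hac
      · rw [hat] at hp
        rw [punct_not_alpha c hp] at hac; exact Bool.false_ne_true hac
    · rw [if_neg hac]
      by_cases hpc : pyPunct c = true
      · rw [if_pos hpc]
        simp only [true_iff]
        exact ⟨w.length, by omega, by rwa [hat], fun m hm1 hm2 => by omega⟩
      · rw [if_neg hpc, ih]
        constructor
        · rintro ⟨i, hi, hp, hall⟩
          refine ⟨i, by omega, by rwa [hlt i hi], ?_⟩
          intro m hm1 hm2
          rw [hlen] at hm2
          rcases Nat.lt_succ_iff_lt_or_eq.mp hm2 with hm' | rfl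
          · rw [hlt m hm']; exact hall m hm1 hm'
          · rw [hat]; exact eq_false_of_ne_true hac
        · rintro ⟨i, hi, hp, hall⟩
          rw [hlen] at hi
          rcases Nat.lt_succ_iff_lt_or_eq.mp hi with hi' | rfl
          · refine ⟨i, hi', by rwa [hlt i hi'] at hp, ?_⟩
            intro m hm1 hm2
            have := hall m hm1 (by omega)
            rwa [hlt m hm2] at this
          · rw [hat] at hp; exact absurd hp hpc

-- characterisation of the inner while-loop
theorem altFind_aux (cs : List Char) (k : Nat) (hk : k < cs.length) : ∀ (d j : Nat), cs.length - j ≤ d →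
    (altFind cs j = k ↔ j ≤ k ∧ PySem.Chars.isalpha (cs.getD k ' ') = true ∧
      ∀ m, j ≤ m → m < k → PySem.Chars.isalpha (cs.getD m ' ') = false) := by
  intro d
  induction d with
  | zero =>
    intro j hj
    have hjl : cs.length ≤ j := by omega
    rw [altFind, dif_neg (by omega)]
    constructor
    · intro h; omega
    · rintro ⟨h1, -, -⟩; omega
  | succ d ih =>
    intro j hj
    by_cases hjl : j < cs.length
    · rw [altFind, dif_pos hjl]
      have hgd : cs.getD j ' ' = cs[j] := List.getD_eq_getElem cs ' ' hjl
      by_cases ha : PySem.Chars.isalpha cs[j] = true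
      · rw [if_pos ha]
        constructor
        · rintro rfl
          exact ⟨le_refl _, by rwa [List.getD_eq_getElem cs ' ' hk], fun m h1 h2 => by omega⟩
        · rintro ⟨h1, h2, h3⟩
          by_contra hne
          have hjk : j < k := by omega
          have := h3 j (le_refl _) hjk
          rw [hgd] at this; rw [this] at ha; exact Bool.false_ne_true ha
      · rw [if_neg ha]
        rw [ih (j + 1) (by omega)]
        constructor
        · rintro ⟨h1, h2, h3⟩
          refine ⟨by omega, h2, fun m hm1 hm2 => ?_⟩
          rcases Nat.eq_or_lt_of_le hm1 with rfl | hm1'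
          · rw [hgd]; exact eq_false_of_ne_true ha
          · exact h3 m hm1' hm2
        · rintro ⟨h1, h2, h3⟩
          have hjk : j ≠ k := by
            rintro rfl
            rw [List.getD_eq_getElem cs ' ' hk] at h2; rw [h2] at ha; exact ha rfl
          exact ⟨by omega, h2, fun m hm1 hm2 => h3 m (by omega) hm2⟩
    · rw [altFind, dif_neg hjl]
      constructor
      · intro h; omega
      · rintro ⟨h1, -, -⟩; omega

theorem altFind_eq_iff (cs : List Char) (k : Nat) (hk : k < cs.length) (j : Nat) :
    altFind cs j = k ↔ j ≤ k ∧ PySem.Chars.isalpha (cs.getD k ' ') = true ∧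
      ∀ m, j ≤ m → m < k → PySem.Chars.isalpha (cs.getD m ' ') = false :=
  altFind_aux cs k hk (cs.length - j) j (le_refl _)

theorem stepB_length (cs chars : List Char) (p : Char × Nat) :
    (stepB cs chars p).length = chars.length := by
  unfold stepB; split
  · split <;> simp
  · rfl

theorem foldB_length (cs : List Char) (L : List (Char × Nat)) : ∀ (chars : List Char),
    (L.foldl (stepB cs) chars).length = chars.length := by
  induction L with
  | nil => intro chars; rfl
  | cons p L ih => intro chars; simp only [List.foldl_cons, ih, stepB_length]

theorem getD_set_self (l : List Char) (i : Nat) (a : Char) (h : i < l.length) :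
    (l.set i a).getD i ' ' = a := by
  rw [List.getD_eq_getElem?_getD, List.getElem?_set_self', List.getElem?_eq_getElem h]
  rfl

theorem getD_set_ne (l : List Char) (i j : Nat) (a : Char) (h : i ≠ j) :
    (l.set i a).getD j ' ' = l.getD j ' ' := by
  rw [List.getD_eq_getElem?_getD, List.getElem?_set_ne h, List.getD_eq_getElem?_getD]

theorem foldB_getD (cs : List Char) (L : List (Char × Nat)) : ∀ (chars : List Char) (k : Nat),
    k < chars.length → chars.length = cs.length →
    (L.foldl (stepB cs) chars).getD k ' ' =
      (if ∃ p ∈ L, pyPunct p.1 = true ∧ altFind cs (p.2 + 1) = k then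
        PySem.Chars.upperChar (cs.getD k ' ') else chars.getD k ' ') := by
  induction L with
  | nil => intro chars k hk hlen; simp
  | cons p L ih =>
    intro chars k hk hlen
    rw [List.foldl_cons]
    rw [ih (stepB cs chars p) k (by rwa [stepB_length]) (by rw [stepB_length]; exact hlen)]
    by_cases hL : ∃ q ∈ L, pyPunct q.1 = true ∧ altFind cs (q.2 + 1) = k
    · rw [if_pos hL, if_pos (by rcases hL with ⟨q, hq, h⟩; exact ⟨q, List.mem_cons_of_mem p hq, h⟩)]
    · rw [if_neg hL]
      by_cases hhd : pyPunct p.1 = true ∧ altFind cs (p.2 + 1) = k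
      · rw [if_pos ⟨p, List.mem_cons_self, hhd⟩]
        unfold stepB
        rw [if_pos hhd.1, hhd.2, if_pos (by omega), getD_set_self chars k _ hk]
      · rw [if_neg (by rintro ⟨q, hq, hq2⟩; rcases List.mem_cons.mp hq with rfl | hq'
                       · exact hhd hq2
                       · exact hL ⟨q, hq', hq2⟩)]
        unfold stepB
        by_cases hp1 : pyPunct p.1 = true
        · rw [if_pos hp1]
          by_cases hlt : altFind cs (p.2 + 1) < cs.length
          · rw [if_pos hlt]
            exact getD_set_ne chars _ k _ (fun he => hhd ⟨hp1, he⟩)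
          · rw [if_neg hlt]
        · rw [if_neg hp1]

-- ===== main assembly =====

theorem main_eq (text : String) : sentence_case_py text = sentence_case_py_alt text := by
  unfold sentence_case_py sentence_case_py_alt
  by_cases h : text = ""
  · rw [if_pos h, if_pos h]
  · rw [if_neg h, if_neg h]
    obtain ⟨c, r, hcs⟩ : ∃ c r, text.toList = c :: r := by
      cases hcs : text.toList with
      | nil => exact absurd (String.toList_eq_nil_iff.mp hcs) h
      | cons c r => exact ⟨c, r, rfl⟩
    rw [hcs]
    dsimp only
    have ht : (if (c :: r).length > 1 then
          PySem.Chars.upper [(c :: r).headI] ++ PySem.List.slice (c :: r) (some 1) none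
        else PySem.Chars.upper (c :: r)) = PySem.Chars.upperChar c :: r := by
      cases r with
      | nil => simp [PySem.Chars.upper]
      | cons d r' =>
        rw [if_pos (by simp)]
        rw [PySem.List.slice_from _ (by norm_num : (0:Int) ≤ 1)]
        simp [PySem.Chars.upper]
    have hchars0 : (c :: r).set 0 (PySem.Chars.upperChar ((c :: r).getD 0 ' ')) =
        PySem.Chars.upperChar c :: r := by simp
    rw [ht, hchars0]
    apply congrArg
    set u : List Char := c :: r with hu
    set t : List Char := PySem.Chars.upperChar c :: r with htdef
    have htu_len : t.length = u.length := by simp [htdef, hu]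
    have hlA : ((t.foldl stepA ([], false)).1).length = t.length := by
      rw [foldA_eq, List.nil_append, gA_length]
    have hlB : (u.zipIdx.foldl (stepB u) t).length = t.length := foldB_length u u.zipIdx t
    -- positional translation between t (first char uppercased) and u (the original)
    have htu_punct : ∀ m, pyPunct (t.getD m ' ') = pyPunct (u.getD m ' ') := by
      intro m; cases m with
      | zero => simp [htdef, hu, punct_up]
      | succ m => simp [htdef, hu]
    have htu_al : ∀ m, PySem.Chars.isalpha (t.getD m ' ') = PySem.Chars.isalpha (u.getD m ' ') := by
      intro m; cases m with
      | zero => simp [htdef, hu, al_up]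
      | succ m => simp [htdef, hu]
    apply List.ext_getElem (by rw [hlA, hlB])
    intro k hk1 hk2
    have hkt : k < t.length := by rwa [hlA] at hk1
    have hku : k < u.length := by rwa [htu_len] at hkt
    rw [← List.getD_eq_getElem _ ' ' hk1, ← List.getD_eq_getElem _ ' ' hk2]
    rw [foldA_eq, List.nil_append, gA_getD t false k hkt]
    rw [foldB_getD u u.zipIdx t k hkt htu_len]
    -- the two edit conditions coincide
    have hzip : (∃ p ∈ u.zipIdx, pyPunct p.1 = true ∧ altFind u (p.2 + 1) = k) ↔
        ∃ i, i < u.length ∧ pyPunct (u.getD i ' ') = true ∧ altFind u (i + 1) = k := by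
      constructor
      · rintro ⟨⟨x, i⟩, hmem, hp, hf⟩
        obtain ⟨-, hi, hx⟩ := List.mem_zipIdx hmem
        simp only [Nat.sub_zero, Nat.zero_add] at hi hx
        have hp' : pyPunct (u.getD i ' ') = true := by
          rw [List.getD_eq_getElem _ ' ' (by omega), ← hx]; exact hp
        exact ⟨i, by omega, hp', hf⟩
      · rintro ⟨i, hi, hp, hf⟩
        refine ⟨(u[i]'hi, i), ?_, by rwa [← List.getD_eq_getElem _ ' ' hi], hf⟩
        have hz : (u.zipIdx)[i]'(by simpa using hi) = (u[i]'hi, i) := by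
          rw [List.getElem_zipIdx]; simp
        rw [← hz]
        exact List.getElem_mem _
    have hcap : capF (t.take k) false = true ↔
        ∃ i, i < k ∧ pyPunct (u.getD i ' ') = true ∧
          ∀ m, i < m → m < k → PySem.Chars.isalpha (u.getD m ' ') = false := by
      rw [capF_iff]
      have hltk : (t.take k).length = k := by rw [List.length_take]; omega
      have hgdt : ∀ m, m < k → (t.take k).getD m ' ' = t.getD m ' ' := by
        intro m hm
        rw [List.getD_eq_getElem?_getD, List.getD_eq_getElem?_getD, List.getElem?_take_of_lt hm]
      constructor
      · rintro ⟨i, hi, hp, hall⟩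
        rw [hltk] at hi
        rw [hgdt i hi, htu_punct] at hp
        refine ⟨i, hi, hp, fun m h1 h2 => ?_⟩
        have := hall m h1 (by omega)
        rwa [hgdt m h2, htu_al] at this
      · rintro ⟨i, hi, hp, hall⟩
        refine ⟨i, by omega, by rwa [hgdt i hi, htu_punct], fun m h1 h2 => ?_⟩
        rw [hltk] at h2
        rw [hgdt m h2, htu_al]
        exact hall m h1 h2
    have hcond : (capF (t.take k) false && PySem.Chars.isalpha (t.getD k ' ')) = true ↔
        (∃ p ∈ u.zipIdx, pyPunct p.1 = true ∧ altFind u (p.2 + 1) = k) := by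
      rw [Bool.and_eq_true, hcap, hzip, htu_al]
      constructor
      · rintro ⟨⟨i, hi, hp, hall⟩, hak⟩
        refine ⟨i, by omega, hp, (altFind_eq_iff u k hku (i + 1)).mpr ⟨by omega, hak, ?_⟩⟩
        intro m h1 h2; exact hall m (by omega) h2
      · rintro ⟨i, hi, hp, hf⟩
        obtain ⟨h1, h2, h3⟩ := (altFind_eq_iff u k hku (i + 1)).mp hf
        exact ⟨⟨i, by omega, hp, fun m hm1 hm2 => h3 m (by omega) hm2⟩, h2⟩
    by_cases hc : ∃ p ∈ u.zipIdx, pyPunct p.1 = true ∧ altFind u (p.2 + 1) = k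
    · rw [if_pos hc, if_pos (hcond.mpr hc)]
      -- k ≥ 1, so t and u agree at k
      obtain ⟨p, -, -, hf⟩ := hc
      have hk1' : p.2 + 1 ≤ k := ((altFind_eq_iff u k hku (p.2 + 1)).mp hf).1
      obtain ⟨k', rfl⟩ : ∃ k', k = k' + 1 := ⟨k - 1, by omega⟩
      simp [htdef, hu]
    · rw [if_neg hc, if_neg (fun hh => hc (hcond.mp hh))]

-- ===== VERDICT (by name: the statement is the Claim_ definition above) =====
theorem sentence_case_py_spec : Claim_equal_sentence_case_py := by
  intro text _
  unfold Spec_sentence_case_py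
  exact main_eq text
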